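-- pv_equiv track=rewrite | github.com/LIIHWF/robot-testing-sc | concrete_layer/falsifier/instantiate.py | _parse_actions
-- ===== SOURCE A (Python) =====
-- from typing import Dict, List, Any, Tuple, Optional, Union
--
-- def _parse_actions(action_str: str) -> List[Dict[str, Any]]:
--     """Parse action string into list of action dictionaries."""
--     actions = []
--
--     # Split by ";" for sequential actions
--     for action in action_str.split(";"):
--         action = action.strip()
--         if not action:
--             continue
--
--         parts = action.split()
--         if len(parts) >= 2:
--             action_type = parts[0]
--
--             if action_type in ("open", "close"):
--                 actions.append({
--                     "action": action_type,
--                     "target": parts[1],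
--                 })
--             elif action_type == "turn_on":
--                 actions.append({
--                     "action": "turn_on",
--                     "target": parts[1],
--                 })
--             elif action_type == "turn_off":
--                 actions.append({
--                     "action": "turn_off",
--                     "target": parts[1],
--                 })
--             elif action_type == "put":
--                 if len(parts) >= 3:
--                     actions.append({
--                         "action": "place",
--                         "object": parts[1],
--                         "target": parts[2],
--                     })
--             elif action_type == "pick":
--                 actions.append({
--                     "action": "pick",
--                     "object": parts[1],
--                 })
--
--     return actions
-- ===== SOURCE B (Python) =====
-- def _emit(words, actions):
--     """Append the action dictionary encoded by one token group, if any."""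
--     match words:
--         case [("open" | "close" | "turn_on" | "turn_off") as verb, target, *_]:
--             actions.append({"action": verb, "target": target})
--         case ["put", obj, target, *_]:
--             actions.append({"action": "place", "object": obj, "target": target})
--         case ["pick", obj, *_]:
--             actions.append({"action": "pick", "object": obj})
--         case _:
--             pass
--
--
-- def _parse_actions(action_str):
--     """Parse action string into list of action dictionaries.
--
--     Single character-level scan: a tiny state machine tokenizes words and
--     emits one action per ';'-terminated group (a sentinel ';' closes the
--     last group)."""
--     actions = []
--     words = []
--     word = []
--     for ch in action_str + ";":
--         if ch == ";":
--             if word: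
--                 words.append("".join(word))
--                 word = []
--             _emit(words, actions)
--             words = []
--         elif ch.isspace():
--             if word:
--                 words.append("".join(word))
--                 word = []
--         else:
--             word.append(ch)
--     return actions
-- ===== Notes on version B (the rewrite author's own statement) =====
-- stated objective: alternative
-- what changed: Replaces A's split/strip/split/if-elif pipeline by a single character-level state machine that scans the string once (with a trailing sentinel separator), tokenizing words on the fly and emitting one action per separator-terminated group through a structural match statement, so no intermediate chunk strings or strip pass are built.
import Mathlib
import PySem

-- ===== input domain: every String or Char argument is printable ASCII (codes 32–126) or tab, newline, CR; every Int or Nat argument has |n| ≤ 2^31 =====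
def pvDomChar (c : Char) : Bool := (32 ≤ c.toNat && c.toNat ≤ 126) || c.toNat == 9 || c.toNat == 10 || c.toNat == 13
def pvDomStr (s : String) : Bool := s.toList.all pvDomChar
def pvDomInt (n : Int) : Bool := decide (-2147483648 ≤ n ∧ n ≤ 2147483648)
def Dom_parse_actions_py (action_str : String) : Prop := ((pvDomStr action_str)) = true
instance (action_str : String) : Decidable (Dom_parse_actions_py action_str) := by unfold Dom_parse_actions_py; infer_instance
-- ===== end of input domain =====

-- B replaces A's split(';')/strip/split()/if-elif pipeline by a single character-level state
-- machine with a trailing sentinel separator, emitting one action per token group via a match;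
-- same return value on every input (alternative decomposition, no speed claim).

-- ===== PORT A =====
-- one iteration of A's loop body (strip, skip empties, split, branch chain)
def pvStepA (acc : List (List (String × String))) (action0 : String) :
    List (List (String × String)) :=
  let action := PySem.Str.strip action0
  if action = "" then acc
  else
    match PySem.Str.split₀ action with
    | p0 :: p1 :: rest =>
        if p0 = "open" ∨ p0 = "close" then acc ++ [[("action", p0), ("target", p1)]]
        else if p0 = "turn_on" then acc ++ [[("action", "turn_on"), ("target", p1)]]
        else if p0 = "turn_off" then acc ++ [[("action", "turn_off"), ("target", p1)]]
        else if p0 = "put" then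
          match rest with
          | p2 :: _ => acc ++ [[("action", "place"), ("object", p1), ("target", p2)]]
          | [] => acc
        else if p0 = "pick" then acc ++ [[("action", "pick"), ("object", p1)]]
        else acc
    | _ => acc

def parse_actions_py (action_str : String) : List (List (String × String)) :=
  -- action_str.split(";"): sep ";" ≠ "" so split? is always some
  ((PySem.Str.split? action_str ";").getD []).foldl pvStepA []

-- ===== PORT B =====
-- _emit of Source B: the match statement, one case per pattern, tried in order
def pvEmit (acts : List (List (String × String))) (words : List String) :
    List (List (String × String)) :=
  match words with
  | verb :: target :: rest =>
      if verb = "open" ∨ verb = "close" ∨ verb = "turn_on" ∨ verb = "turn_off" then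
        acts ++ [[("action", verb), ("target", target)]]
      else if verb = "put" then
        match rest with
        | tgt :: _ => acts ++ [[("action", "place"), ("object", target), ("target", tgt)]]
        | [] => acts
      else if verb = "pick" then acts ++ [[("action", "pick"), ("object", target)]]
      else acts
  | _ => acts

-- the for-loop of Source B: state = (current word chars, words of the current group, actions)
def pvScan : List Char → List Char → List String → List (List (String × String)) →
    List (List (String × String))
  | [], _cur, _words, acts => acts
  | c :: rest, cur, words, acts =>
      if c = ';' then
        pvScan rest [] []
          (pvEmit acts (if cur.isEmpty then words else words ++ [String.ofList cur]))
      else if PySem.Chars.isspace c then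
        pvScan rest [] (if cur.isEmpty then words else words ++ [String.ofList cur]) acts
      else pvScan rest (cur ++ [c]) words acts

def parse_actions_py_alt (action_str : String) : List (List (String × String)) :=
  -- for ch in action_str + ";": the sentinel ';' closes the last group
  pvScan (action_str.toList ++ [';']) [] [] []

-- ===== PRECONDITION & SPEC =====
def Spec_parse_actions_py (action_str : String) (out : List (List (String × String))) : Prop := out = parse_actions_py_alt action_str
instance (action_str : String) (out : List (List (String × String))) : Decidable (Spec_parse_actions_py action_str out) := by unfold Spec_parse_actions_py; infer_instance

-- ===== CLAIM (what is proved, stated in full; the proofs are below) =====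
def Claim_equal_parse_actions_py : Prop := ∀ (action_str : String), Dom_parse_actions_py action_str → Spec_parse_actions_py action_str (parse_actions_py action_str)

-- ===== LEMMAS AND PROOFS =====

-- proof-side recursion capturing split(";") char by char (cur holds the open chunk, reversed)
def pvSegs : List Char → List Char → List (List Char)
  | [], cur => [cur.reverse]
  | c :: r, cur => if c = ';' then cur.reverse :: pvSegs r [] else pvSegs r (c :: cur)

-- proof-side step / flush of Source B's tokenizer state (cur, words)
def pvWStep (st : List Char × List String) (c : Char) : List Char × List String :=
  if PySem.Chars.isspace c then
    if st.1.isEmpty then ([], st.2) else ([], st.2 ++ [String.ofList st.1])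
  else (st.1 ++ [c], st.2)

def pvFlush (st : List Char × List String) : List String :=
  if st.1.isEmpty then st.2 else st.2 ++ [String.ofList st.1]

theorem pv_splitOn_go_char (fuel : Nat) :
    ∀ (l cur : List Char) (acc : List (List Char)), l.length < fuel →
    PySem.Chars.splitOn.go [';'] fuel l cur acc = acc.reverse ++ pvSegs l cur := by
  induction fuel with
  | zero => intro l cur acc h; omega
  | succ fuel ih =>
    intro l cur acc h
    cases l with
    | nil => simp [PySem.Chars.splitOn.go, pvSegs]
    | cons c rest =>
      by_cases hc : c = ';'
      · subst hc
        have hpre : List.isPrefixOf [';'] (';' :: rest) = true := by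
          simp [List.isPrefixOf]
        simp only [PySem.Chars.splitOn.go, hpre, if_true]
        rw [ih _ _ _ (by simp at h ⊢; omega)]
        simp [pvSegs]
      · have hpre : List.isPrefixOf [';'] (c :: rest) = false := by
          simp [List.isPrefixOf]; exact fun hh => hc hh.symm
        simp only [PySem.Chars.splitOn.go]
        rw [if_neg (by simp [hpre]), ih _ _ _ (by simp at h ⊢; omega)]
        rw [pvSegs, if_neg hc]

theorem pv_splitOn_eq_pvSegs (cs : List Char) :
    PySem.Chars.splitOn cs [';'] = pvSegs cs [] := by
  unfold PySem.Chars.splitOn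
  rw [pv_splitOn_go_char _ _ _ _ (by omega)]
  simp

theorem pv_go_acc (cs : List Char) : ∀ (cur : List Char) (acc : List (List Char)),
    PySem.Chars.split₀.go cs cur acc = acc.reverse ++ PySem.Chars.split₀.go cs cur [] := by
  induction cs with
  | nil =>
    intro cur acc
    by_cases hc : cur.isEmpty <;> simp [PySem.Chars.split₀.go, hc]
  | cons c rest ih =>
    intro cur acc
    by_cases hs : PySem.Chars.isspace c
    · by_cases hc : cur.isEmpty
      · simp only [PySem.Chars.split₀.go, hs, if_true, hc]
        exact ih [] acc
      · simp only [PySem.Chars.split₀.go, hs, if_true, hc]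
        rw [ih [] (cur.reverse :: acc), ih [] [cur.reverse]]
        simp
    · simp only [PySem.Chars.split₀.go, hs]
      exact ih (c :: cur) acc

-- split₀ ignores leading/trailing whitespace: the bridge between A (strip then split) and B
theorem pv_go_allspace (ws : List Char) (h : ∀ c ∈ ws, PySem.Chars.isspace c = true)
    (cur : List Char) (acc : List (List Char)) :
    PySem.Chars.split₀.go ws cur acc = PySem.Chars.split₀.go [] cur acc := by
  induction ws generalizing cur acc with
  | nil => rfl
  | cons c rest ih =>
    have hc := h c (by simp)
    have hrest : ∀ x ∈ rest, PySem.Chars.isspace x = true := fun x hm => h x (by simp [hm])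
    by_cases hcur : cur.isEmpty
    · have hcn : cur = [] := List.isEmpty_iff.mp hcur
      subst hcn
      simp only [PySem.Chars.split₀.go, hc, if_true, List.isEmpty_nil]
      exact ih hrest [] acc
    · simp only [PySem.Chars.split₀.go, hc, if_true, hcur]
      rw [ih hrest [] (cur.reverse :: acc)]
      simp [PySem.Chars.split₀.go]

theorem pv_go_append_ws (s ws : List Char) (h : ∀ c ∈ ws, PySem.Chars.isspace c = true)
    (cur : List Char) (acc : List (List Char)) :
    PySem.Chars.split₀.go (s ++ ws) cur acc = PySem.Chars.split₀.go s cur acc := by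
  induction s generalizing cur acc with
  | nil => simpa using pv_go_allspace ws h cur acc
  | cons c rest ih =>
    simp only [List.cons_append, PySem.Chars.split₀.go]
    by_cases hc : PySem.Chars.isspace c
    · simp only [hc, if_true]
      by_cases hcur : cur.isEmpty <;> simp [hcur, ih]
    · simp [hc, ih]

theorem pv_go_ws_prefix (ws s : List Char) (h : ∀ c ∈ ws, PySem.Chars.isspace c = true)
    (acc : List (List Char)) :
    PySem.Chars.split₀.go (ws ++ s) [] acc = PySem.Chars.split₀.go s [] acc := by
  induction ws with
  | nil => rfl
  | cons c rest ih =>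
    have hc := h c (by simp)
    have hrest : ∀ x ∈ rest, PySem.Chars.isspace x = true := fun x hm => h x (by simp [hm])
    simp only [List.cons_append, PySem.Chars.split₀.go, hc, if_true, List.isEmpty_nil]
    exact ih hrest

theorem pv_split₀_strip (s : List Char) :
    PySem.Chars.split₀ (PySem.Chars.strip s) = PySem.Chars.split₀ s := by
  unfold PySem.Chars.split₀ PySem.Chars.strip PySem.Chars.rstrip PySem.Chars.lstrip
  set t := List.dropWhile PySem.Chars.isspace s with ht
  have h1 : PySem.Chars.split₀.go s [] [] = PySem.Chars.split₀.go t [] [] := by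
    conv_lhs => rw [← List.takeWhile_append_dropWhile (p := PySem.Chars.isspace) (l := s)]
    exact pv_go_ws_prefix _ _ (fun x hx => List.mem_takeWhile_imp hx) _
  rw [h1]
  have h2 : t = (List.dropWhile PySem.Chars.isspace t.reverse).reverse
      ++ (List.takeWhile PySem.Chars.isspace t.reverse).reverse := by
    conv_lhs => rw [← List.reverse_reverse t,
      ← List.takeWhile_append_dropWhile (p := PySem.Chars.isspace) (l := t.reverse)]
    rw [List.reverse_append]
  conv_rhs => rw [h2]
  exact (pv_go_append_ws _ _ (fun x hx => List.mem_takeWhile_imp (by simpa using hx)) _ _).symm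

theorem pv_str_split₀_strip (s : String) :
    PySem.Str.split₀ (PySem.Str.strip s) = PySem.Str.split₀ s := by
  simp [PySem.Str.split₀, PySem.Str.toList_strip, pv_split₀_strip]

theorem pv_flush_wsteps (p : List Char) :
    ∀ (cur : List Char) (words : List String),
    pvFlush (p.foldl pvWStep (cur, words)) =
      words ++ (PySem.Chars.split₀.go p cur.reverse []).map String.ofList := by
  induction p with
  | nil =>
    intro cur words
    by_cases hc : cur.isEmpty
    · simp [pvFlush, PySem.Chars.split₀.go, hc]
    · simp [pvFlush, PySem.Chars.split₀.go, hc]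
  | cons c rest ih =>
    intro cur words
    by_cases hs : PySem.Chars.isspace c
    · by_cases hc : cur.isEmpty
      · have hcn : cur = [] := List.isEmpty_iff.mp hc
        subst hcn
        simp only [List.foldl_cons, pvWStep, hs, if_true, List.isEmpty_nil,
          PySem.Chars.split₀.go, List.reverse_nil]
        exact ih [] words
      · have hce : cur.reverse.isEmpty = false := by
          simp at hc ⊢; exact hc
        simp only [List.foldl_cons, pvWStep, hs, if_true, hc, PySem.Chars.split₀.go, hce]
        simp only [if_false, Bool.false_eq_true]
        rw [ih [] (words ++ [String.ofList cur]),
          pv_go_acc rest [] [cur.reverse.reverse]]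
        simp
    · simp only [List.foldl_cons, pvWStep, hs, PySem.Chars.split₀.go,
        Bool.false_eq_true, if_false]
      rw [ih (cur ++ [c]) words]
      simp

theorem pv_stepA_emit (acts : List (List (String × String))) (s : String) :
    pvStepA acts s = pvEmit acts (PySem.Str.split₀ s) := by
  unfold pvStepA
  by_cases hs : PySem.Str.strip s = ""
  · rw [← pv_str_split₀_strip s, hs]
    simp [pvEmit, PySem.Str.split₀, PySem.Chars.split₀, PySem.Chars.split₀.go]
  · simp only [hs, if_false]
    rw [pv_str_split₀_strip s]
    cases hp : PySem.Str.split₀ s with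
    | nil => simp [pvEmit]
    | cons v tl =>
      cases tl with
      | nil => simp [pvEmit]
      | cons x rest =>
        simp only [pvEmit]
        by_cases h1 : v = "open" ∨ v = "close"
        · have h4 : v = "open" ∨ v = "close" ∨ v = "turn_on" ∨ v = "turn_off" :=
            h1.elim (fun h => Or.inl h) (fun h => Or.inr (Or.inl h))
          rw [if_pos h1, if_pos h4]
        · by_cases h2 : v = "turn_on"
          · have h4 : v = "open" ∨ v = "close" ∨ v = "turn_on" ∨ v = "turn_off" :=
              Or.inr (Or.inr (Or.inl h2))
            rw [if_neg h1, if_pos h2, if_pos h4, h2]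
          · by_cases h3 : v = "turn_off"
            · have h4 : v = "open" ∨ v = "close" ∨ v = "turn_on" ∨ v = "turn_off" :=
                Or.inr (Or.inr (Or.inr h3))
              rw [if_neg h1, if_neg h2, if_pos h3, if_pos h4, h3]
            · have h4 : ¬ (v = "open" ∨ v = "close" ∨ v = "turn_on" ∨ v = "turn_off") := by
                rintro (h | h | h | h)
                · exact h1 (Or.inl h)
                · exact h1 (Or.inr h)
                · exact h2 h
                · exact h3 h
              rw [if_neg h1, if_neg h2, if_neg h3, if_neg h4]

theorem pvSegs_noSemi (p : List Char) (hp : ∀ c ∈ p, c ≠ ';') :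
    ∀ cur, pvSegs p cur = [cur.reverse ++ p] := by
  induction p with
  | nil => intro cur; simp [pvSegs]
  | cons c r ih =>
    intro cur
    have hc : c ≠ ';' := hp c (by simp)
    rw [pvSegs, if_neg hc, ih (fun x hx => hp x (by simp [hx])) (c :: cur)]
    simp

theorem pvSegs_append_semi (p : List Char) (hp : ∀ c ∈ p, c ≠ ';') (r : List Char) :
    ∀ cur, pvSegs (p ++ ';' :: r) cur = (cur.reverse ++ p) :: pvSegs r [] := by
  induction p with
  | nil => intro cur; simp [pvSegs]
  | cons c q ih =>
    intro cur
    have hc : c ≠ ';' := hp c (by simp)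
    rw [List.cons_append, pvSegs, if_neg hc, ih (fun x hx => hp x (by simp [hx])) (c :: cur)]
    simp

theorem pv_emit_flush (acts : List (List (String × String))) (p : List Char) :
    pvEmit acts (pvFlush (p.foldl pvWStep ([], []))) =
      pvStepA acts (String.ofList p) := by
  rw [pv_stepA_emit, pv_flush_wsteps p [] []]
  have : (String.ofList p).toList = p := by simp
  simp [PySem.Str.split₀, this, PySem.Chars.split₀]

theorem pv_scan_eq (cs : List Char) :
    ∀ (p : List Char), (∀ c ∈ p, c ≠ ';') →
    ∀ (acts : List (List (String × String))),
    pvScan (cs ++ [';']) (p.foldl pvWStep ([], [])).1 (p.foldl pvWStep ([], [])).2 acts =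
      ((pvSegs (p ++ cs) []).map String.ofList).foldl pvStepA acts := by
  induction cs with
  | nil =>
    intro p hp acts
    rw [List.nil_append, pvScan, if_pos rfl, pvScan]
    rw [show p ++ ([] : List Char) = p from by simp, pvSegs_noSemi p hp]
    simp only [List.map_cons, List.map_nil, List.foldl_cons, List.foldl_nil, List.nil_append,
      List.reverse_nil]
    exact pv_emit_flush acts p
  | cons c cs' ih =>
    intro p hp acts
    by_cases hc : c = ';'
    · subst hc
      rw [List.cons_append, pvScan, if_pos rfl]
      have := ih [] (by simp) (pvEmit acts
        (if (p.foldl pvWStep ([], [])).1.isEmpty then (p.foldl pvWStep ([], [])).2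
         else (p.foldl pvWStep ([], [])).2 ++ [String.ofList (p.foldl pvWStep ([], [])).1]))
      simp only [List.foldl_nil, List.nil_append] at this
      rw [this, pvSegs_append_semi p hp cs' []]
      simp only [List.reverse_nil, List.nil_append, List.map_cons, List.foldl_cons]
      congr 1
      show _ = pvStepA acts (String.ofList p)
      rw [← pv_emit_flush acts p]
      rfl
    · have hp' : ∀ x ∈ p ++ [c], x ≠ ';' := by
        intro x hx
        rcases List.mem_append.mp hx with h | h
        · exact hp x h
        · simp at h; subst h; exact hc
      have hfold : (p ++ [c]).foldl pvWStep ([], []) =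
          pvWStep (p.foldl pvWStep ([], [])) c := by
        rw [List.foldl_append]; rfl
      have key := ih (p ++ [c]) hp' acts
      rw [List.append_assoc, List.singleton_append] at key
      rw [List.cons_append, pvScan, if_neg hc]
      by_cases hs : PySem.Chars.isspace c
      · rw [if_pos hs]
        rw [hfold] at key
        by_cases hcur : (p.foldl pvWStep ([], [])).1.isEmpty
        · rw [← key]
          simp [pvWStep, hs, hcur]
        · rw [← key]
          simp [pvWStep, hs, hcur]
      · rw [if_neg hs]
        rw [hfold] at key
        rw [← key]
        simp [pvWStep, hs]

theorem pv_final (s : String) :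
    pvScan (s.toList ++ [';']) [] [] [] =
      ((PySem.Str.split? s ";").getD []).foldl pvStepA [] := by
  have h := pv_scan_eq s.toList [] (by simp) []
  simp only [List.foldl_nil, List.nil_append] at h
  rw [h]
  have hsep : (";" : String).toList = [';'] := by decide
  simp [PySem.Str.split?, PySem.Chars.split?, hsep, pv_splitOn_eq_pvSegs]

-- ===== VERDICT (by name: the statement is the Claim_ definition above) =====
theorem parse_actions_py_spec : Claim_equal_parse_actions_py := by
  intro s _
  unfold Spec_parse_actions_py parse_actions_py parse_actions_py_alt
  exact (pv_final s).symm
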